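-- pv_equiv track=rewrite | github.com/Billshimmer/blogs | algorithm_problem/number_of_double_zero.py | numberOfDoubleZero
-- ===== SOURCE A (Python) =====
-- def numberOfDoubleZero(n):
--     A = [0]
--     B = [0]
--     for i in range(1, n+1):
--         curA = A[i-1] + B[i-1]
--         curB = A[i-1] + B[i-1] + i%2
--         A.append(curA)
--         B.append(curB)
--
--     return B[n-1]
-- ===== SOURCE B (Python) =====
-- def numberOfDoubleZero(n):
--     # Closed form: the loop's pair sums satisfy S[i] = 2*S[i-1] + i%2, so
--     # 3*S[i] = 2^(i+1) - 2 + i%2 and B[m] = S[m-1] + m%2 for m >= 1.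
--     if n <= 1:
--         return 0
--     m = n - 1
--     return ((1 << m) - 2 + ((m - 1) & 1)) // 3 + (m & 1)
-- ===== Notes on version B (the rewrite author's own statement) =====
-- stated objective: alternative
-- what changed: Replaced the dynamic-programming loop that rebuilds both sequences with a closed-form geometric-sum expression: one shift and one exact division by three.
import Mathlib
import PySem

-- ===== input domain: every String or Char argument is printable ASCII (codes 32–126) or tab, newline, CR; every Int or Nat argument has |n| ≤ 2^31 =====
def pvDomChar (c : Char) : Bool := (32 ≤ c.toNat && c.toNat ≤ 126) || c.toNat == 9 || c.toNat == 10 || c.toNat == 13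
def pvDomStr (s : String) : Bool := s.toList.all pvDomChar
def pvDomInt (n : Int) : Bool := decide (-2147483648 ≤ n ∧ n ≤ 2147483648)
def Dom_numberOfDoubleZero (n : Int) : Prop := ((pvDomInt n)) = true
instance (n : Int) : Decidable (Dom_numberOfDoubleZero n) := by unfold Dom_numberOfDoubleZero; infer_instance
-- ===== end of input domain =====

-- B replaces A's dynamic-programming loop by a closed-form geometric-sum expression
-- (a single shift and an exact division by three).

-- ===== PORT A =====
def numberOfDoubleZero (n : Int) : Int :=
  let st := (PySem.List.pyRange 1 (n + 1) 1).foldl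
    (fun (st : List Int × List Int) i =>
      let curA := PySem.List.pyGetD st.1 (i - 1) 0 + PySem.List.pyGetD st.2 (i - 1) 0
      let curB := PySem.List.pyGetD st.1 (i - 1) 0 + PySem.List.pyGetD st.2 (i - 1) 0
                    + PySem.Int.mod i 2
      (st.1 ++ [curA], st.2 ++ [curB]))
    ([0], [0])
  PySem.List.pyGetD st.2 (n - 1) 0

-- ===== PORT B =====
def numberOfDoubleZero_alt (n : Int) : Int :=
  if n ≤ 1 then 0
  else
    let m := n - 1
    PySem.Int.floordiv (((1 : Int) <<< m.toNat) - 2 + PySem.Int.mod (m - 1) 2) 3 + PySem.Int.mod m 2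

-- ===== PRECONDITION & SPEC =====
-- A raises IndexError (B[n-1] out of range) exactly when n < 0; Pre_ excludes those inputs.
def Pre_numberOfDoubleZero (n : Int) : Prop := 0 ≤ n
instance (n : Int) : Decidable (Pre_numberOfDoubleZero n) := by unfold Pre_numberOfDoubleZero; infer_instance
def pvWitness_numberOfDoubleZero : Int := 5

def Spec_numberOfDoubleZero (n : Int) (out : Int) : Prop := out = numberOfDoubleZero_alt n
instance (n : Int) (out : Int) : Decidable (Spec_numberOfDoubleZero n out) := by unfold Spec_numberOfDoubleZero; infer_instance

-- ===== CLAIM (what is proved, stated in full; the proofs are below) =====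
def Claim_equal_numberOfDoubleZero : Prop := ∀ (n : Int), Dom_numberOfDoubleZero n → Pre_numberOfDoubleZero n → Spec_numberOfDoubleZero n (numberOfDoubleZero n)

-- ===== LEMMAS AND PROOFS =====

-- the DP state of A's loop: (A[j], B[j])
def pvSt : Nat → Int × Int
  | 0 => (0, 0)
  | j + 1 =>
    let p := pvSt j
    (p.1 + p.2, p.1 + p.2 + PySem.Int.mod ((j : Int) + 1) 2)

theorem pvSt_loop (k : Nat) :
    (PySem.List.pyRange 1 ((k : Int) + 1) 1).foldl
      (fun (st : List Int × List Int) i =>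
        let curA := PySem.List.pyGetD st.1 (i - 1) 0 + PySem.List.pyGetD st.2 (i - 1) 0
        let curB := PySem.List.pyGetD st.1 (i - 1) 0 + PySem.List.pyGetD st.2 (i - 1) 0
                      + PySem.Int.mod i 2
        (st.1 ++ [curA], st.2 ++ [curB]))
      ([0], [0])
    = ((List.range (k + 1)).map (fun j => (pvSt j).1),
       (List.range (k + 1)).map (fun j => (pvSt j).2)) := by
  induction k with
  | zero =>
    rw [show ((0 : Nat) : Int) + 1 = 1 by norm_num, PySem.List.pyRange_one_eq_nil (by omega)]
    simp [pvSt]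
  | succ k ih =>
    have hsplit : PySem.List.pyRange 1 ((↑(k + 1) : Int) + 1) 1
        = PySem.List.pyRange 1 ((k : Int) + 1) 1 ++ [(k : Int) + 1] := by
      push_cast
      exact PySem.List.pyRange_one_succ_right (by omega)
    rw [hsplit, List.foldl_append, ih]
    have hlen : ((List.range (k + 1)).map (fun j => (pvSt j).1)).length = k + 1 := by simp
    have hget1 : PySem.List.pyGetD ((List.range (k + 1)).map (fun j => (pvSt j).1)) ((k : Int) + 1 - 1) 0
        = (pvSt k).1 := by
      rw [show ((k : Int) + 1 - 1) = ((k : Nat) : Int) by omega, PySem.List.pyGetD_natCast]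
      simp [List.getD_eq_getElem?_getD]
    have hget2 : PySem.List.pyGetD ((List.range (k + 1)).map (fun j => (pvSt j).2)) ((k : Int) + 1 - 1) 0
        = (pvSt k).2 := by
      rw [show ((k : Int) + 1 - 1) = ((k : Nat) : Int) by omega, PySem.List.pyGetD_natCast]
      simp [List.getD_eq_getElem?_getD]
    simp only [List.foldl_cons, List.foldl_nil, hget1, hget2]
    rw [List.range_succ (n := k + 1)]
    simp [pvSt]

-- the pair-sum invariant: 3 * (A[j] + B[j]) = 2^(j+1) - 2 + j % 2
theorem pvSt_sum (j : Nat) :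
    3 * ((pvSt j).1 + (pvSt j).2) = 2 ^ (j + 1) - 2 + (j : Int) % 2 := by
  induction j with
  | zero => simp [pvSt]
  | succ j ih =>
    have hm : PySem.Int.mod ((j : Int) + 1) 2 = ((j : Int) + 1) % 2 :=
      PySem.Int.mod_eq_emod_of_pos (by omega)
    have hpow : (2 : Int) ^ (j + 1 + 1) = 2 * 2 ^ (j + 1) := by ring
    simp only [pvSt, hm]
    push_cast
    omega

set_option maxRecDepth 8192 in
theorem numberOfDoubleZero_spec : Claim_equal_numberOfDoubleZero := by
  intro n _ hpre
  unfold Pre_numberOfDoubleZero at hpre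
  obtain ⟨k, rfl⟩ : ∃ k : Nat, n = (k : Int) := ⟨n.toNat, by omega⟩
  simp only [Spec_numberOfDoubleZero, numberOfDoubleZero, numberOfDoubleZero_alt]
  rw [pvSt_loop k]
  rcases k with _ | _ | j
  · decide
  · decide
  · simp only [show j + 1 + 1 = j + 2 from rfl]
    have hget : PySem.List.pyGetD ((List.range (j + 2 + 1)).map (fun i => (pvSt i).2))
        ((↑(j + 2) : Int) - 1) 0 = (pvSt (j + 1)).2 := by
      rw [show ((↑(j + 2) : Int) - 1) = ((j + 1 : Nat) : Int) by push_cast; omega,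
        PySem.List.pyGetD_natCast]
      simp [List.getD_eq_getElem?_getD]
    rw [hget]
    have hsum := pvSt_sum j
    have hif : ¬ ((↑(j + 2) : Int) ≤ 1) := by push_cast; omega
    rw [if_neg hif]
    have htn : ((↑(j + 2) : Int) - 1).toNat = j + 1 := by omega
    have hshift : ((1 : Int) <<< (j + 1)) = 2 ^ (j + 1) := by
      rw [Int.shiftLeft_eq]; ring
    have hm1 : PySem.Int.mod ((↑(j + 2) : Int) - 1 - 1) 2 = (j : Int) % 2 := by
      rw [PySem.Int.mod_eq_emod_of_pos (by omega)]; push_cast; omega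
    have hm2 : PySem.Int.mod ((↑(j + 2) : Int) - 1) 2 = ((j : Int) + 1) % 2 := by
      rw [PySem.Int.mod_eq_emod_of_pos (by omega)]; push_cast; omega
    have hmod : PySem.Int.mod (((j : Int)) + 1) 2 = ((j : Int) + 1) % 2 :=
      PySem.Int.mod_eq_emod_of_pos (by omega)
    have hnum : ((1 : Int) <<< (((↑(j + 2) : Int) - 1).toNat)) - 2
        + PySem.Int.mod ((↑(j + 2) : Int) - 1 - 1) 2 = 3 * ((pvSt j).1 + (pvSt j).2) := by
      rw [htn, hshift, hm1, hsum]
    rw [hnum, PySem.Int.floordiv_eq_ediv_of_pos (by omega), Int.mul_ediv_cancel_left _ (by omega)]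
    simp only [pvSt, hmod]
    rw [hm2]
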